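-- pv_equiv track=rewrite | github.com/ormusai35/Deep-Learning-Pro | DeepLearningProject-master/functions.py | prepare_vocabulary
-- ===== SOURCE A (Python) =====
-- def prepare_vocabulary(grams):
--     idx = 0
--     gram2location={}
--     for gram in grams:
-- 	    if gram not in gram2location:
-- 		    gram2location[gram]=idx
-- 		    idx += 1
--     return gram2location
-- ===== SOURCE B (Python) =====
-- def prepare_vocabulary(grams):
--     # Rank distinct grams by sorting them on their first-occurrence position.
--     firsts = sorted(set(grams), key=grams.index)
--     return {gram: rank for rank, gram in enumerate(firsts)}
-- ===== Notes on version B (the rewrite author's own statement) =====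
-- stated objective: alternative
-- what changed: Instead of a single membership-guarded pass maintaining an explicit counter, B collects the distinct grams as a set and sorts them by their first-occurrence position (key=grams.index); the dense index is each gram's rank in that sorted order.
import Mathlib
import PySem

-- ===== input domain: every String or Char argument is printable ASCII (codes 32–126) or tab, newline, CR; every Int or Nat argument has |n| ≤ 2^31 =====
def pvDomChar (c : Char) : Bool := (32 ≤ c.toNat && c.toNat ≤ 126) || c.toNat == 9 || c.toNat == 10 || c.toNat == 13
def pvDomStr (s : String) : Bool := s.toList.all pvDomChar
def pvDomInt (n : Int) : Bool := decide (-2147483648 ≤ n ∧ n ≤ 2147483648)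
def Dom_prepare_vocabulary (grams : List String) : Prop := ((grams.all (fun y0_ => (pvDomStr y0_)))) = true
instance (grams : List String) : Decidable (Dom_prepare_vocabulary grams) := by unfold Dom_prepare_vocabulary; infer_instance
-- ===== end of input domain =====

-- B replaces A's membership-guarded counter loop by a sort of the distinct grams keyed on their
-- first-occurrence position (alternative algorithm; not faster).

-- ===== PORT A =====
-- for gram in grams: if gram not in gram2location: gram2location[gram]=idx; idx += 1
def prepare_vocabulary (grams : List String) : List (String × Int) :=
  (grams.foldl
    (fun (st : Int × PySem.Dict String Int) gram =>
      if st.2.contains gram then st else (st.1 + 1, st.2.insert gram st.1))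
    (0, PySem.Dict.empty)).2.items

-- ===== PORT B =====
-- firsts = sorted(set(grams), key=grams.index); return {gram: rank for rank, gram in enumerate(firsts)}
-- grams.index g: every g drawn from set(grams) is in grams, so index? is some; .getD 0 is exact here.
def prepare_vocabulary_alt (grams : List String) : List (String × Int) :=
  let firsts := PySem.List.sorted (PySem.Set.ofList grams)
      (fun g => (PySem.List.index? grams g).getD 0) false
  ((PySem.List.enumerate firsts 0).foldl
    (fun (d : PySem.Dict String Int) p => d.insert p.2 p.1) PySem.Dict.empty).items

-- ===== PRECONDITION & SPEC =====
def Spec_prepare_vocabulary (grams : List String) (out : List (String × Int)) : Prop := out = prepare_vocabulary_alt grams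
instance (grams : List String) (out : List (String × Int)) : Decidable (Spec_prepare_vocabulary grams out) := by unfold Spec_prepare_vocabulary; infer_instance

-- ===== CLAIM (what is proved, stated in full; the proofs are below) =====
def Claim_equal_prepare_vocabulary : Prop := ∀ (grams : List String), Dom_prepare_vocabulary grams → Spec_prepare_vocabulary grams (prepare_vocabulary grams)

-- ===== LEMMAS AND PROOFS =====

-- the common normal form both ports reach: first occurrences enumerated
def pvPairs (grams : List String) : List (String × Int) :=
  (PySem.List.enumerate (PySem.List.dedup grams) 0).map (fun p => (p.2, p.1))

-- along the first-occurrence dedup, the first-occurrence index is strictly increasing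
lemma pv_dedup_pairwise (xs : List String) :
    (PySem.List.dedup xs).Pairwise
      (fun a b => (PySem.List.index? xs a).getD 0 < (PySem.List.index? xs b).getD 0) := by
  induction xs using List.reverseRecOn with
  | nil => simp [PySem.List.dedup]
  | append_singleton l x ih =>
      have hded : PySem.List.dedup (l ++ [x])
          = if x ∈ PySem.List.dedup l then PySem.List.dedup l else PySem.List.dedup l ++ [x] := by
        simp only [PySem.List.dedup_eq_ofList, PySem.Set.ofList_eq_foldl, List.foldl_append,
          List.foldl_cons, List.foldl_nil]
        rw [← PySem.Set.ofList_eq_foldl]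
        simp [PySem.Set.add, PySem.Set.contains, PySem.Set.ofList_eq_foldl]
      have hkey : ∀ a ∈ PySem.List.dedup l,
          PySem.List.index? (l ++ [x]) a = PySem.List.index? l a := by
        intro a ha
        exact PySem.List.index?_append_of_mem [x] ((PySem.List.mem_dedup _ _).mp ha)
      have hlt : ∀ a ∈ PySem.List.dedup l, (PySem.List.index? l a).getD 0 < l.length := by
        intro a ha
        have hm : a ∈ l := (PySem.List.mem_dedup _ _).mp ha
        rcases Option.isSome_iff_exists.mp ((PySem.List.index?_isSome_iff l a).mpr hm) with ⟨k, hk⟩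
        rcases PySem.List.getElem_of_index?_eq_some hk with ⟨hkl, -, -⟩
        rw [hk]; exact hkl
      by_cases hx : x ∈ PySem.List.dedup l
      · rw [hded, if_pos hx]
        exact ih.imp_of_mem (fun {a b} ha hb h => by rw [hkey a ha, hkey b hb]; exact h)
      · rw [hded, if_neg hx]
        have hxl : x ∉ l := fun h => hx ((PySem.List.mem_dedup _ _).mpr h)
        rw [List.pairwise_append]
        refine ⟨ih.imp_of_mem (fun {a b} ha hb h => by rw [hkey a ha, hkey b hb]; exact h),
          List.pairwise_singleton _ _, ?_⟩
        intro a ha b hb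
        have hb' : b = x := by simpa using hb
        subst hb'
        rw [hkey a ha, PySem.List.index?_append_singleton_self l b hxl]
        simpa using hlt a ha
-- B's sort keyed by grams.index re-creates dedup order, so B reaches pvPairs
lemma pvB_eq (grams : List String) : prepare_vocabulary_alt grams = pvPairs grams := by
  unfold prepare_vocabulary_alt pvPairs
  have hsorted : PySem.List.sorted (PySem.Set.ofList grams)
      (fun g => (PySem.List.index? grams g).getD 0) false = PySem.List.dedup grams := by
    refine PySem.List.sorted_eq_of_perm_of_pairwise_lt _ _ _ ?_ (pv_dedup_pairwise grams)
    rw [PySem.List.dedup_eq_ofList]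
  rw [hsorted]
  rw [PySem.Dict.items_foldl_insert_fresh]
  · simp [PySem.Dict.empty]
  · intro a _; simp [PySem.Dict.contains_empty]
  · rw [show ((PySem.List.enumerate (PySem.List.dedup grams) 0).map (fun p => p.2))
        = PySem.List.dedup grams from PySem.List.map_snd_enumerate _ _]
    exact PySem.List.nodup_dedup grams

-- A's loop invariant, by reverse induction on the input list
lemma pvA_foldl (l : List String) :
    l.foldl (fun (st : Int × PySem.Dict String Int) gram =>
        if st.2.contains gram then st else (st.1 + 1, st.2.insert gram st.1))
      (0, PySem.Dict.empty)
    = (((PySem.List.dedup l).length : Int), PySem.Dict.mk (pvPairs l)) := by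
  induction l using List.reverseRecOn with
  | nil => rfl
  | append_singleton l x ih =>
      rw [List.foldl_append, ih]
      have hded : PySem.List.dedup (l ++ [x])
          = if x ∈ PySem.List.dedup l then PySem.List.dedup l else PySem.List.dedup l ++ [x] := by
        simp only [PySem.List.dedup_eq_ofList, PySem.Set.ofList_eq_foldl, List.foldl_append,
          List.foldl_cons, List.foldl_nil]
        rw [← PySem.Set.ofList_eq_foldl]
        simp [PySem.Set.add, PySem.Set.contains, PySem.Set.ofList_eq_foldl]
      have hkeys : (PySem.Dict.mk (pvPairs l)).keys = PySem.List.dedup l := by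
        simp only [PySem.Dict.keys, pvPairs, List.map_map]
        exact PySem.List.map_snd_enumerate _ _
      have hcont : (PySem.Dict.mk (pvPairs l)).contains x = decide (x ∈ PySem.List.dedup l) := by
        rw [PySem.Dict.contains_eq_decide_mem_keys, hkeys]
      by_cases hx : x ∈ PySem.List.dedup l
      · have hP : pvPairs (l ++ [x]) = pvPairs l := by
          simp only [pvPairs, hded, if_pos hx]
        simp only [List.foldl_cons, List.foldl_nil, hcont, hx, decide_true, if_true, hded, hP]
      · have hP : pvPairs (l ++ [x])
            = pvPairs l ++ [(x, ((PySem.List.dedup l).length : Int))] := by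
          simp only [pvPairs, hded, if_neg hx, PySem.List.enumerate_append, List.map_append]
          simp [PySem.List.enumerate]
        simp only [List.foldl_cons, List.foldl_nil, hcont, hx, decide_false, Bool.false_eq_true,
          if_false, hded]
        rw [Prod.mk.injEq]
        refine ⟨by simp, ?_⟩
        apply PySem.Dict.ext
        rw [PySem.Dict.items_insert_of_not_contains, hP]
        rw [hcont]; simp only [decide_eq_false_iff_not]; exact hx

-- ===== VERDICT (by name: the statement is the Claim_ definition above) =====
theorem prepare_vocabulary_spec : Claim_equal_prepare_vocabulary := by
  intro grams _
  unfold Spec_prepare_vocabulary prepare_vocabulary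
  rw [pvA_foldl, pvB_eq]
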